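-- pv_equiv track=rewrite | github.com/VariPhiGen/hailo_ai_acts | basic_pipelines/reference.py | find_clusters_by_zone
-- ===== SOURCE A (Python) =====
-- def find_clusters_by_zone(gathered_tracker_ids):
--     parent = {}
--
--     # Find function with path compression
--     def find(x):
--         if parent[x] != x:
--             parent[x] = find(parent[x])
--         return parent[x]
--
--     # Union function
--     def union(x, y):
--         root_x = find(x)
--         root_y = find(y)
--         if root_x != root_y:
--             parent[root_y] = root_x
--
--     # Initialize Union-Find structure and process pairs
--     zone_clusters = {}
--     for zone_name, pairs in gathered_tracker_ids.items():
--         for tracker1, tracker2 in pairs: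
--             if tracker1 not in parent:
--                 parent[tracker1] = tracker1
--             if tracker2 not in parent:
--                 parent[tracker2] = tracker2
--             union(tracker1, tracker2)
--
--     # Group elements by their root for each zone
--     for tracker in parent:
--         root = find(tracker)
--         zone_clusters.setdefault(root, []).append(tracker)
--
--     # Organize clusters by zone name
--     result = {}
--     for zone_name in gathered_tracker_ids:
--         zone_result = []
--         seen = set()
--         for tracker1, tracker2 in gathered_tracker_ids[zone_name]:
--             root1, root2 = find(tracker1), find(tracker2)
--             if root1 not in seen:
--                 zone_result.append(zone_clusters[root1])
--                 seen.add(root1)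
--             if root2 not in seen:
--                 zone_result.append(zone_clusters[root2])
--                 seen.add(root2)
--         result[zone_name] = zone_result
--
--     return result
-- ===== SOURCE B (Python) =====
-- def find_clusters_by_zone(gathered_tracker_ids):
--     # Quick-find: every tracker carries its component label directly; a merge
--     # relabels the absorbed component, so no tree, no recursion, no find().
--     label = {}
--     for pairs in gathered_tracker_ids.values():
--         for a, b in pairs:
--             ra = label.setdefault(a, a)
--             rb = label.setdefault(b, b)
--             if ra != rb:
--                 for k, v in label.items():
--                     if v == rb:
--                         label[k] = ra
--
--     members = {}
--     for tracker, root in label.items():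
--         members.setdefault(root, []).append(tracker)
--
--     result = {}
--     for zone, pairs in gathered_tracker_ids.items():
--         clusters = []
--         seen = set()
--         for a, b in pairs:
--             for r in (label[a], label[b]):
--                 if r not in seen:
--                     seen.add(r)
--                     clusters.append(members[r])
--         result[zone] = clusters
--     return result
-- ===== Notes on version B (the rewrite author's own statement) =====
-- stated objective: simpler
-- what changed: A's recursive union-find with path compression (parent-pointer trees, find/union, then a grouping pass over roots) is replaced by a flat quick-find label map: every tracker stores its component label directly and a merge relabels the absorbed component, so there is no recursion, no find() and no path compression; grouping and per-zone assembly then read labels with plain dict lookups.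
import Mathlib
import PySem

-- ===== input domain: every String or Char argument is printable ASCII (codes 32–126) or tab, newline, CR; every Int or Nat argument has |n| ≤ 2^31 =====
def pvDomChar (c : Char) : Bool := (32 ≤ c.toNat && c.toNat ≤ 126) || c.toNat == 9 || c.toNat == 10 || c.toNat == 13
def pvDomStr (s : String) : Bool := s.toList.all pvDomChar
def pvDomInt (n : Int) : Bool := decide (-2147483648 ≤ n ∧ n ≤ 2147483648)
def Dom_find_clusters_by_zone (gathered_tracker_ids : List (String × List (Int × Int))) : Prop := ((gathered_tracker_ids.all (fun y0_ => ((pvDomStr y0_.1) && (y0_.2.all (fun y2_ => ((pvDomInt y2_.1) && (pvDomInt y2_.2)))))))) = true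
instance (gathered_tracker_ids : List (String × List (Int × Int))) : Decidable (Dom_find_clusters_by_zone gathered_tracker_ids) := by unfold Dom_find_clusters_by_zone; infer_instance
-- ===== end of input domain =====

-- B replaces A's recursive path-compressing union-find by a flat quick-find label map
-- (merging relabels the absorbed component); objective: simpler, no recursion.

-- ===== PORT A =====
-- Python's `find` with path compression; the Nat argument is a totality fuel only
-- (the parent chain of the Python dict is acyclic and never longer than the dict,
-- so fuel = parent.size never runs out on reachable states).
-- `parent[x]` is ported as `getD x x`: find is only called on keys of parent, where both agree.
def pvFindA : Nat → PySem.Dict Int Int → Int → PySem.Dict Int Int × Int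
  | 0, p, x => (p, x)
  | n+1, p, x =>
    if p.getD x x ≠ x then
      let res := pvFindA n p (p.getD x x)
      (res.1.insert x res.2, res.2)
    else (p, x)

def pvUnionA (p : PySem.Dict Int Int) (x y : Int) : PySem.Dict Int Int :=
  let f1 := pvFindA p.size p x
  let f2 := pvFindA f1.1.size f1.1 y
  if f1.2 ≠ f2.2 then f2.1.insert f2.2 f1.2 else f2.1

-- `zone_clusters[root]` / `parent[x]` style lookups are ported as getD with a default
-- that is never used on reachable states (the key is always present; KeyError unreachable).
def find_clusters_by_zone (gathered_tracker_ids : List (String × List (Int × Int))) : List (String × List (List Int)) :=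
  let parent := gathered_tracker_ids.foldl (fun p zp => zp.2.foldl (fun (p : PySem.Dict Int Int) pr =>
      let p := if p.contains pr.1 then p else p.insert pr.1 pr.1
      let p := if p.contains pr.2 then p else p.insert pr.2 pr.2
      pvUnionA p pr.1 pr.2) p) PySem.Dict.empty
  let grp := parent.keys.foldl (fun (st : PySem.Dict Int Int × PySem.Dict Int (List Int)) t =>
      let f := pvFindA st.1.size st.1 t
      (f.1, st.2.modify f.2 [] (· ++ [t]))) (parent, PySem.Dict.empty)
  let res := (PySem.Dict.mk gathered_tracker_ids).keys.foldl
      (fun (st : PySem.Dict Int Int × PySem.Dict String (List (List Int))) zone =>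
      let pairs := (PySem.Dict.mk gathered_tracker_ids).getD zone []
      let inner := pairs.foldl (fun (s : PySem.Dict Int Int × List (List Int) × PySem.Set Int) pr =>
          let f1 := pvFindA s.1.size s.1 pr.1
          let f2 := pvFindA f1.1.size f1.1 pr.2
          let s1 := if ¬ s.2.2.contains f1.2 then (s.2.1 ++ [grp.2.getD f1.2 []], PySem.Set.add s.2.2 f1.2) else s.2
          let s2 := if ¬ s1.2.contains f2.2 then (s1.1 ++ [grp.2.getD f2.2 []], PySem.Set.add s1.2 f2.2) else s1
          (f2.1, s2)) (st.1, ([], PySem.Set.empty))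
      (inner.1, st.2.insert zone inner.2.1)) (grp.1, PySem.Dict.empty)
  res.2.items

-- ===== PORT B =====
-- `label[a]` / `members[r]` lookups are ported as getD with a default that is never
-- used on reachable states (every tracker was inserted in the first pass).
def find_clusters_by_zone_alt (gathered_tracker_ids : List (String × List (Int × Int))) : List (String × List (List Int)) :=
  let label := gathered_tracker_ids.foldl (fun l zp => zp.2.foldl (fun (l : PySem.Dict Int Int) pr =>
      let l1 := l.setdefault pr.1 pr.1
      let ra := l1.getD pr.1 pr.1
      let l2 := l1.setdefault pr.2 pr.2
      let rb := l2.getD pr.2 pr.2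
      if ra ≠ rb then
        l2.items.foldl (fun d kv => if kv.2 == rb then d.insert kv.1 ra else d) l2
      else l2) l) PySem.Dict.empty
  let members := label.items.foldl (fun (m : PySem.Dict Int (List Int)) kv =>
      m.modify kv.2 [] (· ++ [kv.1])) PySem.Dict.empty
  let res := gathered_tracker_ids.foldl (fun (res : PySem.Dict String (List (List Int))) zp =>
      let fin := zp.2.foldl (fun (s : List (List Int) × PySem.Set Int) pr =>
          [label.getD pr.1 pr.1, label.getD pr.2 pr.2].foldl (fun s r =>
              if ¬ s.2.contains r then (s.1 ++ [members.getD r []], PySem.Set.add s.2 r) else s) s)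
        ([], PySem.Set.empty)
      res.insert zp.1 fin.1) PySem.Dict.empty
  res.items

-- ===== PRECONDITION & SPEC =====
-- Pre_ excludes association lists with a repeated zone name: A's parameter is a Python
-- dict, whose keys are necessarily distinct, so a list with a duplicate zone name
-- represents no dict A could receive.
def Pre_find_clusters_by_zone (gathered_tracker_ids : List (String × List (Int × Int))) : Prop :=
  (gathered_tracker_ids.map Prod.fst).Nodup
instance (gathered_tracker_ids : List (String × List (Int × Int))) : Decidable (Pre_find_clusters_by_zone gathered_tracker_ids) := by unfold Pre_find_clusters_by_zone; infer_instance

def pvWitness_find_clusters_by_zone : (List (String × List (Int × Int))) :=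
  [("zone1", [(1, 2), (2, 3), (7, 7)]), ("zone2", [(2, 5), (9, 9)])]

def Spec_find_clusters_by_zone (gathered_tracker_ids : List (String × List (Int × Int))) (out : List (String × List (List Int))) : Prop := out = find_clusters_by_zone_alt gathered_tracker_ids
instance (gathered_tracker_ids : List (String × List (Int × Int))) (out : List (String × List (List Int))) : Decidable (Spec_find_clusters_by_zone gathered_tracker_ids out) := by unfold Spec_find_clusters_by_zone; infer_instance

-- ===== CLAIM (what is proved, stated in full; the proofs are below) =====
def Claim_equal_find_clusters_by_zone : Prop := ∀ (gathered_tracker_ids : List (String × List (Int × Int))), Dom_find_clusters_by_zone gathered_tracker_ids → Pre_find_clusters_by_zone gathered_tracker_ids → Spec_find_clusters_by_zone gathered_tracker_ids (find_clusters_by_zone gathered_tracker_ids)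

-- ===== LEMMAS AND PROOFS =====

-- Staged copies of the two ports' pipelines (definitionally equal to the ports).
def pvStepPairA (p : PySem.Dict Int Int) (pr : Int × Int) : PySem.Dict Int Int :=
  let p := if p.contains pr.1 then p else p.insert pr.1 pr.1
  let p := if p.contains pr.2 then p else p.insert pr.2 pr.2
  pvUnionA p pr.1 pr.2

def pvParentA (g : List (String × List (Int × Int))) : PySem.Dict Int Int :=
  g.foldl (fun p zp => zp.2.foldl pvStepPairA p) PySem.Dict.empty

def pvGroupStepA (st : PySem.Dict Int Int × PySem.Dict Int (List Int)) (t : Int) :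
    PySem.Dict Int Int × PySem.Dict Int (List Int) :=
  let f := pvFindA st.1.size st.1 t
  (f.1, st.2.modify f.2 [] (· ++ [t]))

def pvGrpA (g : List (String × List (Int × Int))) :
    PySem.Dict Int Int × PySem.Dict Int (List Int) :=
  (pvParentA g).keys.foldl pvGroupStepA (pvParentA g, PySem.Dict.empty)

def pvInnerStepA (zc : PySem.Dict Int (List Int))
    (s : PySem.Dict Int Int × List (List Int) × PySem.Set Int) (pr : Int × Int) :
    PySem.Dict Int Int × List (List Int) × PySem.Set Int :=
  let f1 := pvFindA s.1.size s.1 pr.1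
  let f2 := pvFindA f1.1.size f1.1 pr.2
  let s1 := if ¬ s.2.2.contains f1.2 then (s.2.1 ++ [zc.getD f1.2 []], PySem.Set.add s.2.2 f1.2) else s.2
  let s2 := if ¬ s1.2.contains f2.2 then (s1.1 ++ [zc.getD f2.2 []], PySem.Set.add s1.2 f2.2) else s1
  (f2.1, s2)

def pvResA (g : List (String × List (Int × Int))) :
    PySem.Dict Int Int × PySem.Dict String (List (List Int)) :=
  (PySem.Dict.mk g).keys.foldl
      (fun st zone =>
      let pairs := (PySem.Dict.mk g).getD zone []
      let inner := pairs.foldl (pvInnerStepA (pvGrpA g).2) (st.1, ([], PySem.Set.empty))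
      (inner.1, st.2.insert zone inner.2.1)) ((pvGrpA g).1, PySem.Dict.empty)

def pvStepPairB (l : PySem.Dict Int Int) (pr : Int × Int) : PySem.Dict Int Int :=
  let l1 := l.setdefault pr.1 pr.1
  let ra := l1.getD pr.1 pr.1
  let l2 := l1.setdefault pr.2 pr.2
  let rb := l2.getD pr.2 pr.2
  if ra ≠ rb then
    l2.items.foldl (fun d kv => if kv.2 == rb then d.insert kv.1 ra else d) l2
  else l2

def pvLabelB (g : List (String × List (Int × Int))) : PySem.Dict Int Int :=
  g.foldl (fun l zp => zp.2.foldl pvStepPairB l) PySem.Dict.empty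

def pvMembersB (g : List (String × List (Int × Int))) : PySem.Dict Int (List Int) :=
  (pvLabelB g).items.foldl (fun m kv => m.modify kv.2 [] (· ++ [kv.1])) PySem.Dict.empty

def pvInnerStepB (lab : PySem.Dict Int Int) (mem : PySem.Dict Int (List Int))
    (s : List (List Int) × PySem.Set Int) (pr : Int × Int) :
    List (List Int) × PySem.Set Int :=
  [lab.getD pr.1 pr.1, lab.getD pr.2 pr.2].foldl (fun s r =>
      if ¬ s.2.contains r then (s.1 ++ [mem.getD r []], PySem.Set.add s.2 r) else s) s

def pvResB (g : List (String × List (Int × Int))) : PySem.Dict String (List (List Int)) :=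
  g.foldl (fun res zp =>
      res.insert zp.1 (zp.2.foldl (pvInnerStepB (pvLabelB g) (pvMembersB g)) ([], PySem.Set.empty)).1)
    PySem.Dict.empty

lemma portA_stage (g : List (String × List (Int × Int))) :
    find_clusters_by_zone g = (pvResA g).2.items := rfl

lemma portB_stage (g : List (String × List (Int × Int))) :
    find_clusters_by_zone_alt g = (pvResB g).items := rfl

-- Iterating the parent map, and the notion "r is the root of x, reached in n steps".
def pvIter (p : PySem.Dict Int Int) : Nat → Int → Int
  | 0, x => x
  | n+1, x => pvIter p n (p.getD x x)

def pvRoot (p : PySem.Dict Int Int) (x r : Int) (n : Nat) : Prop :=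
  pvIter p n x = r ∧ p.getD r r = r

def pvVals (p : PySem.Dict Int Int) : Prop := ∀ kv ∈ p.items, p.contains kv.2 = true

-- number of non-root entries; an upper bound for every chain length
def pvNF (p : PySem.Dict Int Int) : Nat := p.items.countP (fun kv => kv.2 != kv.1)

-- The bridge invariant: B's label map reads off exactly the union-find roots of A's parent map.
def pvInv (p l : PySem.Dict Int Int) : Prop :=
  l.keys = p.keys ∧ p.keys.Nodup ∧ pvVals p ∧
  ∀ x : Int, ∃ n, n ≤ pvNF p ∧ pvRoot p x (l.getD x x) n

lemma pvBoolFalse {b : Bool} (h : ¬ b = true) : b = false := by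
  cases b with
  | false => rfl
  | true => exact absurd rfl h

lemma pvGetEq {p : PySem.Dict Int Int} {x : Int} (hc : p.contains x = true) (d0 : Int) :
    p.get? x = some (p.getD x d0) := by
  have hs : (p.get? x).isSome = true := by
    rw [← PySem.Dict.contains_eq_isSome_get?]; exact hc
  obtain ⟨v, hv'⟩ := Option.isSome_iff_exists.mp hs
  rw [hv', PySem.Dict.getD_of_get?_eq_some p d0 hv']

lemma pvIter_fix (p : PySem.Dict Int Int) (r : Int) (h : p.getD r r = r) :
    ∀ n, pvIter p n r = r := by
  intro n; induction n with
  | zero => rfl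
  | succ n ih => simp [pvIter, h, ih]

lemma pvRoot_stable {p : PySem.Dict Int Int} :
    ∀ (n : Nat) (x r : Int), pvRoot p x r n → ∀ m, n ≤ m → pvIter p m x = r := by
  intro n
  induction n with
  | zero =>
    intro x r h m _
    obtain ⟨h1, h2⟩ := h
    have hx : x = r := h1
    rw [hx]
    exact pvIter_fix p r h2 m
  | succ n ih =>
    intro x r h m hm
    match m, hm with
    | m+1, hm =>
      exact ih (p.getD x x) r ⟨h.1, h.2⟩ m (Nat.le_of_succ_le_succ hm)

lemma pvRoot_unique {p : PySem.Dict Int Int} {x r1 r2 : Int} {n1 n2 : Nat}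
    (h1 : pvRoot p x r1 n1) (h2 : pvRoot p x r2 n2) : r1 = r2 := by
  have e1 := pvRoot_stable n1 x r1 h1 (max n1 n2) (Nat.le_max_left _ _)
  have e2 := pvRoot_stable n2 x r2 h2 (max n1 n2) (Nat.le_max_right _ _)
  rw [e1] at e2; exact e2

lemma pvRoot_contains {p : PySem.Dict Int Int} (hv : pvVals p) :
    ∀ (n : Nat) (x r : Int), pvRoot p x r n → r = x ∨ p.contains r = true := by
  intro n
  induction n with
  | zero =>
    intro x r h
    left
    have h1 : x = r := h.1
    exact h1.symm
  | succ n ih =>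
    intro x r h
    rcases ih (p.getD x x) r ⟨h.1, h.2⟩ with h' | h'
    · by_cases hc : p.contains x = true
      · right
        have hmem := PySem.Dict.mem_items_of_get?_eq_some p (pvGetEq hc x)
        have h2 := hv _ hmem
        rw [h']
        simpa using h2
      · left
        have hgd : p.getD x x = x := PySem.Dict.getD_of_not_contains p x (pvBoolFalse hc)
        rw [h', hgd]
    · right; exact h'

lemma pvContains_congr {p q : PySem.Dict Int Int} (h : p.keys = q.keys) (z : Int) :
    p.contains z = q.contains z := by
  rw [PySem.Dict.contains_eq_decide_mem_keys, PySem.Dict.contains_eq_decide_mem_keys, h]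

lemma pvNF_le_size (p : PySem.Dict Int Int) : pvNF p ≤ p.size :=
  List.countP_le_length

lemma pvVals_insert {p : PySem.Dict Int Int} {x r : Int}
    (hr : r = x ∨ p.contains r = true) (hv : pvVals p) : pvVals (p.insert x r) := by
  intro kv hkv
  rw [PySem.Dict.mem_items_insert] at hkv
  rw [PySem.Dict.contains_insert]
  rcases hkv with rfl | ⟨hm, _⟩
  · rcases hr with rfl | hr
    · simp
    · simp [hr]
  · simp [hv _ hm]

lemma pvNF_insert_fresh {p : PySem.Dict Int Int} {x : Int}
    (hc : p.contains x = false) : pvNF (p.insert x x) = pvNF p := by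
  unfold pvNF
  rw [PySem.Dict.items_insert_of_not_contains p x hc, List.countP_append]
  simp

lemma pvNF_insert_root {p : PySem.Dict Int Int} {x r : Int} {k : Nat}
    (hc : p.contains x = true) (hnd : p.keys.Nodup) (hroot : pvRoot p x r k) :
    pvNF (p.insert x r) = pvNF p := by
  unfold pvNF
  rw [PySem.Dict.items_insert_of_contains p r hc, List.countP_map]
  refine List.countP_congr ?_
  intro kv hkv
  simp only [Function.comp_apply]
  by_cases hfst : kv.1 = x
  · have hget : p.get? x = some kv.2 :=
      PySem.Dict.get?_of_mem_items p (by rw [← hfst]; exact hkv) hnd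
    have hgd : p.getD x x = kv.2 := PySem.Dict.getD_of_get?_eq_some p x hget
    by_cases hvx : kv.2 = x
    · have hrx : r = x := pvRoot_unique hroot ((⟨rfl, by rw [hgd, hvx]⟩ : pvRoot p x x 0))
      simp [hfst, hrx, hvx]
    · have hrnex : r ≠ x := by
        intro hh
        apply hvx
        have h2 := hroot.2
        rw [hh, hgd] at h2
        exact h2
      simp [hfst, hrnex, hvx]
  · have hfkv : (if (kv.1 == x) = true then ((x : Int), r) else kv) = kv := by
      rw [if_neg (by simp [hfst])]
    rw [hfkv]

lemma pvCountP_map_flip {ry rx : Int} (hne : rx ≠ ry) :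
    ∀ (l : List (Int × Int)), (l.map Prod.fst).Nodup → (ry, ry) ∈ l →
    (l.map (fun kv => if (kv.1 == ry) = true then ((ry : Int), rx) else kv)).countP
        (fun kv => kv.2 != kv.1)
      = l.countP (fun kv => kv.2 != kv.1) + 1 := by
  intro l
  induction l with
  | nil => intro _ h; simp at h
  | cons kv t ih =>
    intro hnd hmem
    simp only [List.map_cons, List.countP_cons]
    by_cases hfst : kv.1 = ry
    · have hkv : kv = (ry, ry) := by
        rcases List.mem_cons.mp hmem with h | h
        · exact h.symm
        · exfalso
          have hmm : ry ∈ t.map Prod.fst := List.mem_map.mpr ⟨(ry, ry), h, rfl⟩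
          have hnd1 := (List.nodup_cons.mp hnd).1
          rw [hfst] at hnd1
          exact hnd1 hmm
      have ht : t.map (fun kv => if (kv.1 == ry) = true then ((ry : Int), rx) else kv) = t := by
        refine (List.map_congr_left ?_).trans (List.map_id t)
        intro a ha
        have hane : a.1 ≠ ry := by
          intro hh
          have hmm : ry ∈ t.map Prod.fst := List.mem_map.mpr ⟨a, ha, hh⟩
          have hnd1 := (List.nodup_cons.mp hnd).1
          rw [hfst] at hnd1
          exact hnd1 hmm
        simp [hane]
      subst hkv
      rw [ht]
      simp [hne]
    · have hmem' : (ry, ry) ∈ t := by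
        rcases List.mem_cons.mp hmem with h | h
        · exfalso; apply hfst; rw [← h]
        · exact h
      rw [ih (List.nodup_cons.mp hnd).2 hmem']
      rw [if_neg (show ¬ ((kv.1 == ry) = true) by simp [hfst])]
      omega

lemma pvNF_insert_flip {p : PySem.Dict Int Int} {ry rx : Int}
    (hc : p.contains ry = true) (hnd : p.keys.Nodup)
    (hfix : p.getD ry ry = ry) (hne : rx ≠ ry) :
    pvNF (p.insert ry rx) = pvNF p + 1 := by
  have hget : p.get? ry = some ry := by
    have := pvGetEq hc ry
    rw [hfix] at this
    exact this
  have hmem : (ry, ry) ∈ p.items := PySem.Dict.mem_items_of_get?_eq_some p hget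
  unfold pvNF
  rw [PySem.Dict.items_insert_of_contains p rx hc]
  exact pvCountP_map_flip hne p.items hnd hmem

lemma pvRoot_insert_redirect {q : PySem.Dict Int Int} {x r : Int} {k : Nat}
    (hx : pvRoot q x r k) :
    ∀ (m : Nat) (y r' : Int), pvRoot q y r' m → ∃ m' ≤ m, pvRoot (q.insert x r) y r' m' := by
  intro m
  induction m with
  | zero =>
    intro y r' h
    have hy : y = r' := h.1
    by_cases hyx : y = x
    · have hrr : r = r' := pvRoot_unique hx ((⟨show pvIter q 0 x = r' by rw [← hyx]; exact h.1, h.2⟩ : pvRoot q x r' 0))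
      have hr'x : r' = x := by rw [← hy, hyx]
      refine ⟨0, Nat.le_refl _, hy, ?_⟩
      have hrx : r = x := hrr.trans hr'x
      rw [hr'x, hrx]
      exact PySem.Dict.getD_insert_self q x x x
    · refine ⟨0, Nat.le_refl _, hy, ?_⟩
      have hr'x : r' ≠ x := by rw [← hy]; exact hyx
      rw [PySem.Dict.getD_insert_of_ne _ _ _ hr'x]
      exact h.2
  | succ m ih =>
    intro y r' h
    by_cases hyx : y = x
    · subst hyx
      have hrr : r' = r := pvRoot_unique h hx
      by_cases hrx : r = y
      · refine ⟨0, Nat.zero_le _, ?_, ?_⟩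
        · show y = r'
          rw [hrr, hrx]
        · rw [hrr, hrx]
          exact PySem.Dict.getD_insert_self q y y y
      · refine ⟨1, by omega, ?_, ?_⟩
        · show pvIter (q.insert y r) 0 ((q.insert y r).getD y y) = r'
          rw [PySem.Dict.getD_insert_self]
          exact hrr.symm
        · rw [hrr]
          rw [PySem.Dict.getD_insert_of_ne _ _ _ hrx]
          exact hx.2
    · obtain ⟨m', hm', hz'⟩ := ih (q.getD y y) r' ⟨h.1, h.2⟩
      refine ⟨m' + 1, by omega, ?_, hz'.2⟩
      show pvIter (q.insert x r) m' ((q.insert x r).getD y y) = r'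
      rw [PySem.Dict.getD_insert_of_ne _ _ _ hyx]
      exact hz'.1

lemma pvRoot_insert_union {q : PySem.Dict Int Int} {ry rx : Int}
    (hry : q.getD ry ry = ry) (hrx : q.getD rx rx = rx) (hne : rx ≠ ry) :
    ∀ (m : Nat) (y r' : Int), pvRoot q y r' m →
      ∃ m' ≤ m + 1, pvRoot (q.insert ry rx) y (if r' = ry then rx else r') m' := by
  have hfixrx : (q.insert ry rx).getD rx rx = rx := by
    rw [PySem.Dict.getD_insert_of_ne _ _ _ hne]; exact hrx
  intro m
  induction m with
  | zero =>
    intro y r' h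
    have hy : y = r' := h.1
    by_cases hyy : r' = ry
    · refine ⟨1, by omega, ?_, ?_⟩
      · rw [if_pos hyy]
        show pvIter (q.insert ry rx) 0 ((q.insert ry rx).getD y y) = rx
        rw [hy, hyy, PySem.Dict.getD_insert_self]
        rfl
      · rw [if_pos hyy]; exact hfixrx
    · refine ⟨0, by omega, ?_, ?_⟩
      · rw [if_neg hyy]; exact hy
      · have hr'ne : r' ≠ ry := hyy
        rw [if_neg hyy, PySem.Dict.getD_insert_of_ne _ _ _ hr'ne]
        exact h.2
  | succ m ih =>
    intro y r' h
    by_cases hyy : y = ry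
    · have hiter : pvIter q m (q.getD y y) = r' := h.1
      rw [hyy, hry] at hiter
      have hr' : r' = ry := by rw [← pvIter_fix q ry hry m]; exact hiter.symm
      refine ⟨1, by omega, ?_, ?_⟩
      · rw [if_pos hr']
        show pvIter (q.insert ry rx) 0 ((q.insert ry rx).getD y y) = rx
        rw [hyy, PySem.Dict.getD_insert_self]
        rfl
      · rw [if_pos hr']; exact hfixrx
    · obtain ⟨m', hm', hz'⟩ := ih (q.getD y y) r' ⟨h.1, h.2⟩
      refine ⟨m' + 1, by omega, ?_, hz'.2⟩
      show pvIter (q.insert ry rx) m' ((q.insert ry rx).getD y y) = _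
      rw [PySem.Dict.getD_insert_of_ne _ _ _ hyy]
      exact hz'.1

lemma pvRoot_insert_fresh {q : PySem.Dict Int Int} {x : Int}
    (hc : q.contains x = false) :
    ∀ (m : Nat) (y r' : Int), pvRoot q y r' m → pvRoot (q.insert x x) y r' m := by
  have hqx : q.getD x x = x := PySem.Dict.getD_of_not_contains q x hc
  intro m
  induction m with
  | zero =>
    intro y r' h
    have hy : y = r' := h.1
    refine ⟨hy, ?_⟩
    by_cases hyx : r' = x
    · rw [hyx]
      exact PySem.Dict.getD_insert_self q x x x
    · rw [PySem.Dict.getD_insert_of_ne _ _ _ hyx]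
      exact h.2
  | succ m ih =>
    intro y r' h
    have hz' := ih (q.getD y y) r' ⟨h.1, h.2⟩
    refine ⟨?_, hz'.2⟩
    show pvIter (q.insert x x) m ((q.insert x x).getD y y) = r'
    by_cases hyx : y = x
    · rw [hyx, PySem.Dict.getD_insert_self]
      have := hz'.1
      rw [hyx, hqx] at this
      exact this
    · rw [PySem.Dict.getD_insert_of_ne _ _ _ hyx]
      exact hz'.1

lemma pvFindA_spec (n : Nat) : ∀ {fuel : Nat} {p : PySem.Dict Int Int} {x r : Int},
    pvRoot p x r n → n ≤ fuel → pvVals p → p.keys.Nodup →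
    (pvFindA fuel p x).2 = r ∧
    (pvFindA fuel p x).1.keys = p.keys ∧
    pvVals (pvFindA fuel p x).1 ∧
    pvNF (pvFindA fuel p x).1 = pvNF p ∧
    (∀ (m : Nat) (y r' : Int), pvRoot p y r' m → ∃ m' ≤ m, pvRoot (pvFindA fuel p x).1 y r' m') := by
  induction n with
  | zero =>
    intro fuel p x r hroot _ hv hnd
    have hx : x = r := hroot.1
    subst hx
    have hfix : p.getD x x = x := hroot.2
    have heq : pvFindA fuel p x = (p, x) := by
      cases fuel with
      | zero => rfl
      | succ fuel => simp [pvFindA, hfix]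
    rw [heq]
    exact ⟨rfl, rfl, hv, rfl, fun m y r' h => ⟨m, Nat.le_refl _, h⟩⟩
  | succ n ih =>
    intro fuel p x r hroot hle hv hnd
    by_cases hne : p.getD x x ≠ x
    · match fuel, hle with
      | fuel+1, hle =>
        have hz : pvRoot p (p.getD x x) r n := ⟨hroot.1, hroot.2⟩
        obtain ⟨Hval, Hkeys, Hvals, Hnf, Hpres⟩ := ih hz (Nat.le_of_succ_le_succ hle) hv hnd
        have hstep : pvFindA (fuel+1) p x
            = ((pvFindA fuel p (p.getD x x)).1.insert x (pvFindA fuel p (p.getD x x)).2,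
               (pvFindA fuel p (p.getD x x)).2) := by
          simp [pvFindA, hne]
        rw [hstep, Hval]
        have hndres : (pvFindA fuel p (p.getD x x)).1.keys.Nodup := by rw [Hkeys]; exact hnd
        obtain ⟨k', _, hx'⟩ := Hpres (n+1) x r hroot
        have hcx : p.contains x = true := by
          by_contra hcf
          exact hne (PySem.Dict.getD_of_not_contains p x (pvBoolFalse hcf))
        have hcxres : (pvFindA fuel p (p.getD x x)).1.contains x = true := by
          rw [pvContains_congr Hkeys x]; exact hcx
        refine ⟨rfl, ?_, ?_, ?_, ?_⟩
        · rw [PySem.Dict.keys_insert_of_contains _ _ hcxres, Hkeys]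
        · exact pvVals_insert (pvRoot_contains Hvals k' x r hx') Hvals
        · rw [pvNF_insert_root hcxres hndres hx', Hnf]
        · intro m y r' h
          obtain ⟨m1, hm1, h1⟩ := Hpres m y r' h
          obtain ⟨m2, hm2, h2⟩ := pvRoot_insert_redirect hx' m1 y r' h1
          exact ⟨m2, Nat.le_trans hm2 hm1, h2⟩
    · have hnex : p.getD x x = x := not_ne_iff.mp hne
      have hrx : r = x := pvRoot_unique hroot ((⟨rfl, hnex⟩ : pvRoot p x x 0))
      have heq : pvFindA fuel p x = (p, x) := by
        cases fuel with
        | zero => rfl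
        | succ fuel => simp [pvFindA, hnex]
      rw [heq, hrx]
      exact ⟨rfl, rfl, hv, rfl, fun m y r' h => ⟨m, Nat.le_refl _, h⟩⟩

lemma pvInv_find {p l : PySem.Dict Int Int} (h : pvInv p l) (x : Int) :
    (pvFindA p.size p x).2 = l.getD x x ∧ pvInv (pvFindA p.size p x).1 l := by
  obtain ⟨hkeys, hnd, hv, hroot⟩ := h
  obtain ⟨n, hn, hr⟩ := hroot x
  obtain ⟨Hval, Hkeys, Hvals, Hnf, Hpres⟩ :=
    pvFindA_spec n hr (Nat.le_trans hn (pvNF_le_size p)) hv hnd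
  refine ⟨Hval, ?_, ?_, Hvals, ?_⟩
  · rw [Hkeys]; exact hkeys
  · rw [Hkeys]; exact hnd
  · intro y
    obtain ⟨m, hm, hmr⟩ := hroot y
    obtain ⟨m', hm', h'⟩ := Hpres m y _ hmr
    exact ⟨m', by rw [Hnf]; exact Nat.le_trans hm' hm, h'⟩

lemma pvInv_empty : pvInv PySem.Dict.empty PySem.Dict.empty := by
  refine ⟨rfl, ?_, ?_, ?_⟩
  · rw [PySem.Dict.keys_empty]; exact List.nodup_nil
  · intro kv hkv
    have hempty : (PySem.Dict.empty : PySem.Dict Int Int).items = [] := rfl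
    rw [hempty] at hkv
    cases hkv
  · intro x
    refine ⟨0, Nat.le_refl _, ?_, ?_⟩
    · show x = PySem.Dict.empty.getD x x
      rw [PySem.Dict.getD_empty]
    · rw [PySem.Dict.getD_empty, PySem.Dict.getD_empty]

lemma pvInv_setdefault {p l : PySem.Dict Int Int} (c : Int) (h : pvInv p l) :
    pvInv (if p.contains c then p else p.insert c c) (l.setdefault c c) := by
  obtain ⟨hkeys, hnd, hv, hroot⟩ := h
  have hcc : l.contains c = p.contains c := pvContains_congr hkeys c
  cases hb : p.contains c with
  | true =>
    rw [if_pos rfl, PySem.Dict.setdefault_of_contains _ _ (by rw [hcc, hb])]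
    exact ⟨hkeys, hnd, hv, hroot⟩
  | false =>
    rw [if_neg (by exact Bool.false_ne_true),
      PySem.Dict.setdefault_of_not_contains _ _ (by rw [hcc, hb])]
    refine ⟨?_, ?_, ?_, ?_⟩
    · rw [PySem.Dict.keys_insert_of_not_contains _ _ (by rw [hcc, hb]),
        PySem.Dict.keys_insert_of_not_contains _ _ hb, hkeys]
    · exact PySem.Dict.nodup_keys_insert p c c hnd
    · exact pvVals_insert (Or.inl rfl) hv
    · intro x
      by_cases hxc : x = c
      · subst hxc
        refine ⟨0, Nat.zero_le _, ?_, ?_⟩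
        · show x = (l.insert x x).getD x x
          rw [PySem.Dict.getD_insert_self]
        · rw [PySem.Dict.getD_insert_self, PySem.Dict.getD_insert_self]
      · obtain ⟨n, hn, hr⟩ := hroot x
        refine ⟨n, ?_, ?_⟩
        · rw [pvNF_insert_fresh hb]; exact hn
        · rw [PySem.Dict.getD_insert_of_ne _ _ _ hxc]
          exact pvRoot_insert_fresh hb n x _ hr

-- relabel loop: pointwise description of B's merge
lemma pvRelabel_get?_not_mem {ra rb : Int} :
    ∀ (ps : List (Int × Int)) (d : PySem.Dict Int Int) (k : Int), k ∉ ps.map Prod.fst →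
    (ps.foldl (fun d kv => if kv.2 == rb then d.insert kv.1 ra else d) d).get? k = d.get? k := by
  intro ps
  induction ps with
  | nil => intro d k _; rfl
  | cons kv t ih =>
    intro d k hk
    simp only [List.map_cons, List.mem_cons, not_or] at hk
    simp only [List.foldl_cons]
    rw [ih _ k hk.2]
    by_cases hc : kv.2 == rb
    · rw [if_pos hc, PySem.Dict.get?_insert_of_ne _ _ hk.1]
    · rw [if_neg hc]

lemma pvRelabel_get?_mem {ra rb : Int} :
    ∀ (ps : List (Int × Int)) (d : PySem.Dict Int Int), (ps.map Prod.fst).Nodup →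
    (∀ kv ∈ ps, d.get? kv.1 = some kv.2) →
    ∀ k v, (k, v) ∈ ps →
    (ps.foldl (fun d kv => if kv.2 == rb then d.insert kv.1 ra else d) d).get? k
      = some (if v = rb then ra else v) := by
  intro ps
  induction ps with
  | nil => intro d _ _ k v h; simp at h
  | cons kv t ih =>
    intro d hnd hd k v hmem
    simp only [List.foldl_cons]
    rcases List.mem_cons.mp hmem with heq | hmem'
    · have hk : kv.1 = k := by rw [← heq]
      have hv : kv.2 = v := by rw [← heq]
      have hknot : k ∉ t.map Prod.fst := by
        have hnd1 := (List.nodup_cons.mp hnd).1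
        rw [hk] at hnd1; exact hnd1
      rw [pvRelabel_get?_not_mem t _ k hknot]
      by_cases hc : kv.2 == rb
      · have hvrb : v = rb := by rw [← hv]; exact beq_iff_eq.mp hc
        rw [if_pos hc, hk, PySem.Dict.get?_insert_self, if_pos hvrb]
      · have hvrb : ¬ v = rb := by rw [← hv]; exact fun hh => hc (beq_iff_eq.mpr hh)
        rw [if_neg hc, if_neg hvrb, ← hk, ← hv]
        exact hd kv (List.mem_cons_self)
    · have hkne : k ≠ kv.1 := by
        intro hh
        have hnd1 := (List.nodup_cons.mp hnd).1
        apply hnd1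
        rw [← hh]
        exact List.mem_map.mpr ⟨(k, v), hmem', rfl⟩
      refine ih _ (List.nodup_cons.mp hnd).2 ?_ k v hmem'
      intro kv' hkv'
      have hne' : kv'.1 ≠ kv.1 := by
        intro hh
        have hnd1 := (List.nodup_cons.mp hnd).1
        apply hnd1
        rw [← hh]
        exact List.mem_map.mpr ⟨kv', hkv', rfl⟩
      by_cases hc : kv.2 == rb
      · rw [if_pos hc, PySem.Dict.get?_insert_of_ne _ _ hne']
        exact hd kv' (List.mem_cons_of_mem _ hkv')
      · rw [if_neg hc]
        exact hd kv' (List.mem_cons_of_mem _ hkv')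

lemma pvRelabel_keys {ra rb : Int} :
    ∀ (ps : List (Int × Int)) (d : PySem.Dict Int Int),
    (∀ kv ∈ ps, d.contains kv.1 = true) →
    (ps.foldl (fun d kv => if kv.2 == rb then d.insert kv.1 ra else d) d).keys = d.keys := by
  intro ps
  induction ps with
  | nil => intro d _; rfl
  | cons kv t ih =>
    intro d hc
    simp only [List.foldl_cons]
    by_cases hb : kv.2 == rb
    · rw [if_pos hb]
      have hk : (d.insert kv.1 ra).keys = d.keys :=
        PySem.Dict.keys_insert_of_contains _ _ (hc kv (List.mem_cons_self))
      rw [ih _ ?_, hk]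
      intro kv' hkv'
      rw [pvContains_congr hk kv'.1]
      exact hc kv' (List.mem_cons_of_mem _ hkv')
    · rw [if_neg hb]
      exact ih _ (fun kv' hkv' => hc kv' (List.mem_cons_of_mem _ hkv'))

lemma pvRelabel_keys_self {ra rb : Int} {l : PySem.Dict Int Int} :
    (l.items.foldl (fun d kv => if kv.2 == rb then d.insert kv.1 ra else d) l).keys = l.keys := by
  apply pvRelabel_keys
  intro kv hkv
  rw [PySem.Dict.contains_eq_decide_mem_keys]
  simp only [decide_eq_true_eq]
  show kv.1 ∈ l.items.map (fun x => x.1)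
  exact List.mem_map.mpr ⟨kv, hkv, rfl⟩

lemma pvRelabel_getD {ra rb : Int} {l : PySem.Dict Int Int}
    (hnd : l.keys.Nodup) (hrb : l.contains rb = true) (x : Int) :
    (l.items.foldl (fun d kv => if kv.2 == rb then d.insert kv.1 ra else d) l).getD x x
      = if l.getD x x = rb then ra else l.getD x x := by
  by_cases hx : l.contains x = true
  · have hmem : (x, l.getD x x) ∈ l.items := PySem.Dict.mem_items_of_get?_eq_some l (pvGetEq hx x)
    have hpoint := pvRelabel_get?_mem (ra := ra) (rb := rb) l.items l hnd
      (fun kv hkv => PySem.Dict.get?_of_mem_items l (by exact hkv) hnd) x _ hmem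
    rw [PySem.Dict.getD_eq_get?_getD, hpoint]
    rfl
  · have hxf : l.contains x = false := pvBoolFalse hx
    have hxk : x ∉ l.items.map Prod.fst := by
      intro hh
      rw [PySem.Dict.contains_eq_decide_mem_keys] at hxf
      simp only [decide_eq_false_iff_not] at hxf
      exact hxf hh
    have hgd : l.getD x x = x := PySem.Dict.getD_of_not_contains l x hxf
    rw [PySem.Dict.getD_eq_get?_getD, pvRelabel_get?_not_mem l.items l x hxk,
      ← PySem.Dict.getD_eq_get?_getD, hgd]
    have hxrb : ¬ x = rb := by
      intro hh
      rw [hh] at hxf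
      rw [hxf] at hrb
      exact Bool.false_ne_true hrb
    rw [if_neg hxrb]

lemma pvInv_pair {p l : PySem.Dict Int Int} (pr : Int × Int) (h : pvInv p l) :
    pvInv (pvStepPairA p pr) (pvStepPairB l pr) := by
  simp only [pvStepPairA, pvStepPairB, pvUnionA]
  have h1 : pvInv (if p.contains pr.1 then p else p.insert pr.1 pr.1) (l.setdefault pr.1 pr.1) :=
    pvInv_setdefault pr.1 h
  set p1 := if p.contains pr.1 then p else p.insert pr.1 pr.1 with hp1
  set l1 := l.setdefault pr.1 pr.1 with hl1
  have h2 : pvInv (if p1.contains pr.2 then p1 else p1.insert pr.2 pr.2) (l1.setdefault pr.2 pr.2) :=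
    pvInv_setdefault pr.2 h1
  set p2 := if p1.contains pr.2 then p1 else p1.insert pr.2 pr.2 with hp2
  set l2 := l1.setdefault pr.2 pr.2 with hl2
  have hra : l2.getD pr.1 pr.1 = l1.getD pr.1 pr.1 := by
    by_cases hba : pr.1 = pr.2
    · rw [hl2, ← hba, PySem.Dict.getD_setdefault_self]
    · rw [hl2, PySem.Dict.getD_eq_get?_getD, PySem.Dict.get?_setdefault_of_ne _ _ hba,
        ← PySem.Dict.getD_eq_get?_getD]
  have hf1 := pvInv_find h2 pr.1
  set f1 := pvFindA p2.size p2 pr.1 with hf1d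
  have hf2 := pvInv_find hf1.2 pr.2
  set f2 := pvFindA f1.1.size f1.1 pr.2 with hf2d
  have hinv2 : pvInv f2.1 l2 := hf2.2
  have hv1 : f1.2 = l1.getD pr.1 pr.1 := by rw [hf1.1, hra]
  have hv2 : f2.2 = l2.getD pr.2 pr.2 := hf2.1
  rw [hv1, hv2]
  set ra := l1.getD pr.1 pr.1 with hrad
  set rb := l2.getD pr.2 pr.2 with hrbd
  by_cases hab : ra ≠ rb
  · rw [if_pos hab, if_pos hab]
    obtain ⟨hkeys2, hnd2, hvals2, hroot2⟩ := hinv2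
    have hndl2 : l2.keys.Nodup := by rw [hkeys2]; exact hnd2
    obtain ⟨na, hna, hroota⟩ := hroot2 pr.1
    obtain ⟨nb, hnb, hrootb⟩ := hroot2 pr.2
    rw [hra] at hroota
    have hfixa : f2.1.getD ra ra = ra := hroota.2
    have hfixb : f2.1.getD rb rb = rb := hrootb.2
    have hcl2a : l2.contains pr.1 = true := by
      rw [hl2, PySem.Dict.contains_setdefault, hl1, PySem.Dict.contains_setdefault]
      simp
    have hcl2b : l2.contains pr.2 = true := by
      rw [hl2, PySem.Dict.contains_setdefault]; simp
    have hca : f2.1.contains ra = true := by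
      rcases pvRoot_contains hvals2 na pr.1 ra hroota with hh | hh
      · rw [hh, ← pvContains_congr hkeys2 pr.1]; exact hcl2a
      · exact hh
    have hcb : f2.1.contains rb = true := by
      rcases pvRoot_contains hvals2 nb pr.2 rb hrootb with hh | hh
      · rw [hh, ← pvContains_congr hkeys2 pr.2]; exact hcl2b
      · exact hh
    have hcl2rb : l2.contains rb = true := by
      rw [pvContains_congr hkeys2 rb]; exact hcb
    refine ⟨?_, ?_, ?_, ?_⟩
    · rw [pvRelabel_keys_self, hkeys2, PySem.Dict.keys_insert_of_contains _ _ hcb]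
    · rw [PySem.Dict.keys_insert_of_contains _ _ hcb]; exact hnd2
    · exact pvVals_insert (Or.inr hca) hvals2
    · intro x
      obtain ⟨n, hn, hr⟩ := hroot2 x
      obtain ⟨m', hm', h'⟩ := pvRoot_insert_union hfixb hfixa hab n x _ hr
      refine ⟨m', ?_, ?_⟩
      · rw [pvNF_insert_flip hcb hnd2 hfixb hab]; omega
      · rw [pvRelabel_getD hndl2 hcl2rb x]
        by_cases hx : l2.getD x x = rb
        · rw [if_pos hx]
          rw [if_pos hx] at h'
          exact h'
        · rw [if_neg hx]
          rw [if_neg hx] at h'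
          exact h'
  · rw [if_neg hab, if_neg hab]
    exact hinv2

lemma pvInv_pairs :
    ∀ (prs : List (Int × Int)) (p l : PySem.Dict Int Int), pvInv p l →
    pvInv (prs.foldl pvStepPairA p) (prs.foldl pvStepPairB l) := by
  intro prs
  induction prs with
  | nil => intro p l h; exact h
  | cons pr t ih =>
    intro p l h
    exact ih _ _ (pvInv_pair pr h)

lemma pvInv_phase1 (g : List (String × List (Int × Int))) :
    pvInv (pvParentA g) (pvLabelB g) := by
  unfold pvParentA pvLabelB
  suffices H : ∀ (zs : List (String × List (Int × Int))) (p l : PySem.Dict Int Int), pvInv p l →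
      pvInv (zs.foldl (fun p zp => zp.2.foldl pvStepPairA p) p)
            (zs.foldl (fun l zp => zp.2.foldl pvStepPairB l) l) by
    exact H g _ _ pvInv_empty
  intro zs
  induction zs with
  | nil => intro p l h; exact h
  | cons zp t ih =>
    intro p l h
    exact ih _ _ (pvInv_pairs zp.2 p l h)

lemma pvGroup_loop (l : PySem.Dict Int Int) :
    ∀ (ks : List Int) (p : PySem.Dict Int Int) (zc : PySem.Dict Int (List Int)), pvInv p l →
    pvInv (ks.foldl pvGroupStepA (p, zc)).1 l ∧
    (ks.foldl pvGroupStepA (p, zc)).2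
      = ks.foldl (fun zc t => zc.modify (l.getD t t) [] (· ++ [t])) zc := by
  intro ks
  induction ks with
  | nil => intro p zc h; exact ⟨h, rfl⟩
  | cons t ks ih =>
    intro p zc h
    have hf := pvInv_find h t
    have hstep : pvGroupStepA (p, zc) t
        = ((pvFindA p.size p t).1, zc.modify (l.getD t t) [] (· ++ [t])) := by
      simp only [pvGroupStepA]
      rw [hf.1]
    simp only [List.foldl_cons, hstep]
    exact ih _ _ hf.2

lemma pvMembers_eq (l : PySem.Dict Int Int) (hnd : l.keys.Nodup) :
    l.keys.foldl (fun zc t => zc.modify (l.getD t t) [] (· ++ [t])) PySem.Dict.empty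
      = l.items.foldl (fun m kv => m.modify kv.2 [] (· ++ [kv.1])) PySem.Dict.empty := by
  show List.foldl (fun zc t => zc.modify (l.getD t t) [] (· ++ [t])) PySem.Dict.empty
      (l.items.map (fun x => x.1)) = _
  rw [List.foldl_map]
  exact PySem.List.foldl_congr_mem l.items _ _ _ (fun acc kv hkv => by
    rw [PySem.Dict.getD_of_mem_items l (show (kv.1, kv.2) ∈ l.items from hkv) hnd])

lemma pvInner_loop (l : PySem.Dict Int Int) (mem : PySem.Dict Int (List Int)) :
    ∀ (prs : List (Int × Int)) (p : PySem.Dict Int Int) (acc : List (List Int) × PySem.Set Int),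
    pvInv p l →
    pvInv (prs.foldl (pvInnerStepA mem) (p, acc)).1 l ∧
    (prs.foldl (pvInnerStepA mem) (p, acc)).2 = prs.foldl (pvInnerStepB l mem) acc := by
  intro prs
  induction prs with
  | nil => intro p acc h; exact ⟨h, rfl⟩
  | cons pr t ih =>
    intro p acc h
    have hf1 := pvInv_find h pr.1
    have hf2 := pvInv_find hf1.2 pr.2
    have hstep : pvInnerStepA mem (p, acc) pr
        = ((pvFindA (pvFindA p.size p pr.1).1.size (pvFindA p.size p pr.1).1 pr.2).1,
           pvInnerStepB l mem acc pr) := by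
      simp only [pvInnerStepA, pvInnerStepB, List.foldl_cons, List.foldl_nil]
      rw [hf1.1, hf2.1]
    simp only [List.foldl_cons, hstep]
    exact ih _ _ hf2.2

def pvZoneStepA (mem : PySem.Dict Int (List Int))
    (st : PySem.Dict Int Int × PySem.Dict String (List (List Int)))
    (zp : String × List (Int × Int)) :
    PySem.Dict Int Int × PySem.Dict String (List (List Int)) :=
  let inner := zp.2.foldl (pvInnerStepA mem) (st.1, ([], PySem.Set.empty))
  (inner.1, st.2.insert zp.1 inner.2.1)

lemma pvZones_loop (l : PySem.Dict Int Int) (mem : PySem.Dict Int (List Int)) :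
    ∀ (zs : List (String × List (Int × Int))) (p : PySem.Dict Int Int)
      (res : PySem.Dict String (List (List Int))), pvInv p l →
    (zs.foldl (pvZoneStepA mem) (p, res)).2
      = zs.foldl (fun res zp =>
          res.insert zp.1 (zp.2.foldl (pvInnerStepB l mem) ([], PySem.Set.empty)).1) res := by
  intro zs
  induction zs with
  | nil => intro p res h; rfl
  | cons zp t ih =>
    intro p res h
    have hi := pvInner_loop l mem zp.2 p ([], PySem.Set.empty) h
    have hstep : pvZoneStepA mem (p, res) zp
        = ((zp.2.foldl (pvInnerStepA mem) (p, ([], PySem.Set.empty))).1,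
           res.insert zp.1 (zp.2.foldl (pvInnerStepB l mem) ([], PySem.Set.empty)).1) := by
      simp only [pvZoneStepA]
      rw [hi.2]
    simp only [List.foldl_cons, hstep]
    exact ih _ _ hi.1

lemma pvMain_eq (g : List (String × List (Int × Int)))
    (hpre : (g.map Prod.fst).Nodup) :
    find_clusters_by_zone g = find_clusters_by_zone_alt g := by
  have hinv : pvInv (pvParentA g) (pvLabelB g) := pvInv_phase1 g
  have hndl : (pvLabelB g).keys.Nodup := by rw [hinv.1]; exact hinv.2.1
  have hgrp := pvGroup_loop (pvLabelB g) (pvParentA g).keys (pvParentA g) PySem.Dict.empty hinv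
  have hgrp2 : (pvGrpA g).2 = pvMembersB g := by
    unfold pvGrpA pvMembersB
    rw [hgrp.2, ← hinv.1, pvMembers_eq (pvLabelB g) hndl]
  have hginv : pvInv (pvGrpA g).1 (pvLabelB g) := hgrp.1
  rw [portA_stage, portB_stage]
  suffices h : (pvResA g).2 = pvResB g by rw [h]
  unfold pvResA pvResB
  rw [hgrp2]
  rw [PySem.Dict.keys_mk, List.foldl_map]
  have hnodupmk : (PySem.Dict.mk g).keys.Nodup := by
    rw [PySem.Dict.keys_mk]; exact hpre
  have hfg : List.foldl
      (fun (st : PySem.Dict Int Int × PySem.Dict String (List (List Int)))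
           (zp : String × List (Int × Int)) =>
        let pairs := (PySem.Dict.mk g).getD zp.1 []
        let inner := pairs.foldl (pvInnerStepA (pvMembersB g)) (st.1, ([], PySem.Set.empty))
        (inner.1, st.2.insert zp.1 inner.2.1))
      ((pvGrpA g).1, PySem.Dict.empty) g
      = List.foldl (pvZoneStepA (pvMembersB g)) ((pvGrpA g).1, PySem.Dict.empty) g := by
    refine PySem.List.foldl_congr_mem g _ _ _ ?_
    intro st zp hzp
    have hitems : (zp.1, zp.2) ∈ (PySem.Dict.mk g).items := by
      show (zp.1, zp.2) ∈ g
      exact hzp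
    have hpairs : (PySem.Dict.mk g).getD zp.1 [] = zp.2 :=
      PySem.Dict.getD_of_mem_items _ hitems hnodupmk []
    simp only [pvZoneStepA, hpairs]
  rw [show (List.foldl
      (fun (x : PySem.Dict Int Int × PySem.Dict String (List (List Int)))
           (y : String × List (Int × Int)) =>
        let pairs := (PySem.Dict.mk g).getD y.1 []
        let inner := pairs.foldl (pvInnerStepA (pvMembersB g)) (x.1, ([], PySem.Set.empty))
        (inner.1, x.2.insert y.1 inner.2.1))
      ((pvGrpA g).1, PySem.Dict.empty) g).2
    = (List.foldl (pvZoneStepA (pvMembersB g)) ((pvGrpA g).1, PySem.Dict.empty) g).2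
    from congrArg Prod.snd hfg]
  exact pvZones_loop (pvLabelB g) (pvMembersB g) g (pvGrpA g).1 PySem.Dict.empty hginv

-- ===== VERDICT (by name: the statement is the Claim_ definition above) =====
theorem find_clusters_by_zone_spec : Claim_equal_find_clusters_by_zone := by
  intro g _hdom hpre
  unfold Spec_find_clusters_by_zone
  exact pvMain_eq g hpre
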